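-- pv_equiv track=rewrite | github.com/mmarcos05/Guia3conMartu | Luli/parcialesPython/parcial_billeteras_v.py | hay_repetidos
-- ===== SOURCE A (Python) =====
-- def hay_repetidos(lista: list[int]) -> bool:
--     i: int = 0
--     contador: int = 0
--
--     for i in range(len(lista)):
--         for elemento in lista:
--             if elemento != 0:
--                 if elemento == lista[i]:
--                     contador += 1
--                 if contador > 1:
--                     return True
--         contador = 0
--     return False
-- ===== SOURCE B (Python) =====
-- def hay_repetidos(lista: list[int]) -> bool:
--     s = sorted(v for v in lista if v != 0)
--     for prev, cur in zip(s, s[1:]):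
--         if prev == cur:
--             return True
--     return False
-- ===== Notes on version B (the rewrite author's own statement) =====
-- stated objective: alternative
-- what changed: Replaces the nested repeated-scan (for each index, rescan the whole list counting matches) with filter-nonzeros, sort, then one linear pass comparing adjacent elements; A can still exit early on an early duplicate, so no overall speed is claimed.
import Mathlib
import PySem

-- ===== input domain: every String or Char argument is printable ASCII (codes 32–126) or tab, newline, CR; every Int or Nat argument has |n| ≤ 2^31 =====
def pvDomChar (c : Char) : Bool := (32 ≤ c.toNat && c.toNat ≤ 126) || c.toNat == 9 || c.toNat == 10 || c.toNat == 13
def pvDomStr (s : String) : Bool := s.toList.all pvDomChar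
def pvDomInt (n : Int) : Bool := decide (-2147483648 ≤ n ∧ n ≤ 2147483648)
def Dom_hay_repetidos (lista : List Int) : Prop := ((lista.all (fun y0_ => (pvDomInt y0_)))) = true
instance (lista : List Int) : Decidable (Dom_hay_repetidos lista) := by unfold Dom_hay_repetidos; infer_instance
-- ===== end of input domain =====

-- B replaces A's nested repeated-scan with filter-nonzeros + sort + one adjacent-compare pass (alternative algorithm).

-- ===== PORT A =====
-- inner 'for elemento in lista' loop; state = contador; first component true = 'return True'
def pvInnerA (pivot : Int) : List Int → Int → Bool × Int
  | [], c => (false, c)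
  | e :: rest, c =>
    if e ≠ 0 then
      let c' := if e = pivot then c + 1 else c
      if c' > 1 then (true, c') else pvInnerA pivot rest c'
    else pvInnerA pivot rest c

-- outer 'for i in range(len(lista))' loop; contador is reset to 0 before each inner pass
def pvOuterA (lista : List Int) : List Int → Bool
  | [] => false
  | i :: rest =>
    -- lista[i]: i comes from range(len(lista)), so the index is always in range
    if (pvInnerA ((PySem.List.pyGet? lista i).getD 0) lista 0).1 then true
    else pvOuterA lista rest

def hay_repetidos (lista : List Int) : Bool :=
  pvOuterA lista (PySem.List.pyRange 0 lista.length 1)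

-- ===== PORT B =====
-- 'for prev, cur in zip(s, s[1:])' adjacent comparison
def pvAdjDup : List Int → Bool
  | a :: b :: rest => a = b || pvAdjDup (b :: rest)
  | _ => false

def hay_repetidos_alt (lista : List Int) : Bool :=
  pvAdjDup (PySem.List.sorted (lista.filter (fun v => v ≠ 0)) (fun x => x) false)

-- ===== PRECONDITION & SPEC =====
def Spec_hay_repetidos (lista : List Int) (out : Bool) : Prop := out = hay_repetidos_alt lista
instance (lista : List Int) (out : Bool) : Decidable (Spec_hay_repetidos lista out) := by unfold Spec_hay_repetidos; infer_instance

-- ===== CLAIM (what is proved, stated in full; the proofs are below) =====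
def Claim_equal_hay_repetidos : Prop := ∀ (lista : List Int), Dom_hay_repetidos lista → Spec_hay_repetidos lista (hay_repetidos lista)

-- ===== LEMMAS AND PROOFS =====

-- the inner pass returns True iff the pivot is nonzero and occurs at least twice (given contador ≤ 1)
lemma pvInnerA_spec (pivot : Int) (l : List Int) (c : Int) (hc : c ≤ 1) :
    (pvInnerA pivot l c).1 =
      decide (pivot ≠ 0 ∧ 2 ≤ c + (l.count pivot : Int)) := by
  induction l generalizing c with
  | nil =>
    simp only [pvInnerA, List.count_nil]
    symm; rw [decide_eq_false_iff_not]
    rintro ⟨-, h⟩; omega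
  | cons e rest ih =>
    by_cases he : e = 0
    · subst he
      rw [show pvInnerA pivot (0 :: rest) c = pvInnerA pivot rest c from by
            simp [pvInnerA]]
      rw [ih c hc, decide_eq_decide]
      by_cases hp : pivot = 0
      · simp [hp]
      · simp [Ne.symm hp]
    · by_cases hep : e = pivot
      · subst hep
        by_cases hgt' : (1:Int) < c + 1
        · rw [show pvInnerA e (e :: rest) c = (true, c + 1) from by
                simp [pvInnerA, he, hgt']]
          symm; rw [decide_eq_true_eq]
          refine ⟨he, ?_⟩
          have : (0:Int) ≤ (rest.count e : Int) := Int.natCast_nonneg _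
          simp only [List.count_cons_self]
          push_cast; omega
        · have h1 : c + 1 ≤ 1 := by omega
          rw [show pvInnerA e (e :: rest) c = pvInnerA e rest (c + 1) from by
                simp [pvInnerA, he, hgt']]
          rw [ih (c + 1) h1, decide_eq_decide]
          simp only [List.count_cons_self]
          constructor <;> (rintro ⟨h, h2⟩; refine ⟨h, ?_⟩; push_cast at h2 ⊢; omega)
      · have hgt' : ¬ (1:Int) < c := by omega
        rw [show pvInnerA pivot (e :: rest) c = pvInnerA pivot rest c from by
              simp [pvInnerA, he, hep, hgt']]
        rw [ih c hc, decide_eq_decide]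
        simp [hep]

-- the outer loop is an existential over the index list
lemma pvOuterA_spec (lista : List Int) (idxs : List Int) :
    pvOuterA lista idxs = true ↔
      ∃ i ∈ idxs, (pvInnerA ((PySem.List.pyGet? lista i).getD 0) lista 0).1 = true := by
  induction idxs with
  | nil => simp [pvOuterA]
  | cons i rest ih =>
    simp only [pvOuterA]
    by_cases h : (pvInnerA ((PySem.List.pyGet? lista i).getD 0) lista 0).1 = true
    · simp only [h, if_true, true_iff]
      exact ⟨i, List.mem_cons_self, h⟩
    · simp only [h, if_false, ih, Bool.false_eq_true]
      constructor
      · rintro ⟨j, hj, hji⟩; exact ⟨j, List.mem_cons_of_mem _ hj, hji⟩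
      · rintro ⟨j, hj, hji⟩
        rcases List.mem_cons.mp hj with rfl | hj'
        · exact absurd hji h
        · exact ⟨j, hj', hji⟩

-- characterisation of A: some nonzero element occurs at least twice
lemma hay_repetidos_iff (lista : List Int) :
    hay_repetidos lista = true ↔ ∃ x ∈ lista, x ≠ 0 ∧ 2 ≤ lista.count x := by
  rw [hay_repetidos, pvOuterA_spec]
  constructor
  · rintro ⟨i, hi, hinner⟩
    rw [PySem.List.mem_pyRange_one] at hi
    obtain ⟨h0, hlen⟩ := hi
    rw [PySem.List.pyGet?_eq_some_getElem lista h0 hlen] at hinner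
    simp only [Option.getD_some] at hinner
    rw [pvInnerA_spec _ _ _ (by omega)] at hinner
    rw [decide_eq_true_eq] at hinner
    refine ⟨lista[i.toNat]'(by omega), List.getElem_mem _, hinner.1, ?_⟩
    have := hinner.2; omega
  · rintro ⟨x, hx, hx0, hcnt⟩
    obtain ⟨n, hn, hxn⟩ := List.getElem_of_mem hx
    refine ⟨(n : Int), ?_, ?_⟩
    · rw [PySem.List.mem_pyRange_one]; constructor <;> omega
    · rw [PySem.List.pyGet?_eq_some_getElem lista (by omega) (by exact_mod_cast hn)]
      simp only [Option.getD_some, Int.toNat_natCast, hxn]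
      rw [pvInnerA_spec _ _ _ (by omega), decide_eq_true_eq]
      exact ⟨hx0, by omega⟩

-- on a ≤-sorted list, an adjacent duplicate exists iff the list is not Nodup
lemma pvAdjDup_iff (s : List Int) (hs : s.Pairwise (· ≤ ·)) :
    pvAdjDup s = true ↔ ¬ s.Nodup := by
  induction s with
  | nil => simp [pvAdjDup]
  | cons a t ih =>
    cases t with
    | nil => simp [pvAdjDup]
    | cons b u =>
      have hs' : (b :: u).Pairwise (· ≤ ·) := hs.tail
      have hab : a ≤ b := (List.pairwise_cons.mp hs).1 b (by simp)
      simp only [pvAdjDup, Bool.or_eq_true, decide_eq_true_eq, ih hs']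
      constructor
      · rintro (rfl | hnd)
        · intro h; exact (List.nodup_cons.mp h).1 (by simp)
        · intro h; exact hnd (List.nodup_cons.mp h).2
      · intro h
        by_cases hab' : a = b
        · exact Or.inl hab'
        · right; intro hnd
          apply h
          rw [List.nodup_cons]
          refine ⟨?_, hnd⟩
          intro hmem
          rcases List.mem_cons.mp hmem with rfl | hu
          · exact hab' rfl
          · have hbu : ∀ y ∈ u, b ≤ y := (List.pairwise_cons.mp hs').1
            have h1 : b ≤ a := hbu a hu
            exact hab' (le_antisymm hab h1)

-- characterisation of B: same existential
lemma hay_repetidos_alt_iff (lista : List Int) :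
    hay_repetidos_alt lista = true ↔ ∃ x ∈ lista, x ≠ 0 ∧ 2 ≤ lista.count x := by
  set f := lista.filter (fun v => v ≠ 0) with hf
  have hperm : (PySem.List.sorted f (fun x => x) false).Perm f := PySem.List.sorted_perm f _ _
  rw [hay_repetidos_alt, ← hf,
      pvAdjDup_iff _ (PySem.List.sorted_pairwise f (fun x => x)),
      hperm.nodup_iff, List.nodup_iff_count_le_one]
  push Not
  constructor
  · rintro ⟨x, hx⟩
    have hx0 : x ≠ 0 := by
      rintro rfl
      have hmem : (0:Int) ∉ f := by
        intro hmem
        have := List.of_mem_filter hmem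
        simp at this
      rw [List.count_eq_zero.mpr hmem] at hx
      omega
    have hcf : f.count x = lista.count x := by
      rw [hf, List.count_filter (by simp [hx0])]
    have hxmem : x ∈ f := List.count_pos_iff.mp (by omega)
    exact ⟨x, List.mem_of_mem_filter hxmem, hx0, by omega⟩
  · rintro ⟨x, hx, hx0, hcnt⟩
    refine ⟨x, ?_⟩
    rw [hf, List.count_filter (by simp [hx0])]
    omega

-- ===== VERDICT (by name: the statement is the Claim_ definition above) =====
theorem hay_repetidos_spec : Claim_equal_hay_repetidos := by
  intro lista _
  unfold Spec_hay_repetidos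
  rw [Bool.eq_iff_iff, hay_repetidos_iff, hay_repetidos_alt_iff]
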